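-- pv_equiv track=rewrite | github.com/suhyehye/Coding-Test | 프로그래머스/2/388353. 지게차와 크레인/지게차와 크레인.py | solution
-- ===== SOURCE A (Python) =====
-- from collections import deque
--
-- def remove_one(storage, x, n, m):
--     dx = [-1, 1, 0, 0]
--     dy = [0, 0, -1, 1]
--     visited = [[0] * m for _ in range(n)]
--
--     for i in range(n):
--         for j in range(m):
--             if (i==0 or i==n-1 or j==0 or j==m-1) and (visited[i][j] == 0):
--                 if storage[i][j] == x:
--                     storage[i][j] = "."
--                     visited[i][j] = 1
--
--                 elif storage[i][j] == ".":
--                     q = deque([[i,j]])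
--                     visited[i][j] = 1
--                     while q:
--                         tmp_x, tmp_y = q.pop()
--                         visited[tmp_x][tmp_y] = 1
--                         for k in range(4):
--                             nx = tmp_x + dx[k]
--                             ny = tmp_y + dy[k]
--                             if 0 <= nx < len(storage) and 0 <= ny < len(storage[0]) and visited[nx][ny] == 0:
--                                 if storage[nx][ny] == ".":
--                                     visited[nx][ny] = 1
--                                     q.append([nx, ny])
--                                 elif storage[nx][ny] == x:
--                                     visited[nx][ny] = 1
--                                     storage[nx][ny] = "."
--
--
--     return storage
--
-- def remove_two(storage, x, n, m):
--     ### 예외 처리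
--     # if len(x) <= 1 or len(x) > 2:
--     #     return storage
--     # if x[0] != x[1]:
--     #     return storage
--     for i in range(n):
--         for j in range(m):
--             if storage[i][j] == x[0]:
--                 storage[i][j] = "."
--     return storage
--
-- def solution(storage, requests):
--     n = len(storage)
--     m = len(storage[0])
--     for i in range(n):
--         storage[i] = list(storage[i])
--
--     for x in requests:
--         if len(x) == 1:
--             storage = remove_one(storage, x, n, m)
--         else:
--             storage = remove_two(storage, x, n, m)
--
--     cnt = 0
--     for x in range(n):
--         for y in range(m):
--             if storage[x][y] != ".":
--                 cnt += 1
--     return cnt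
-- ===== SOURCE B (Python) =====
-- def clear_accessible(grid, x, n, m):
--     # mark = least set of '.' cells containing the boundary '.' cells and closed
--     # under 4-adjacency, computed as a bounded fixpoint iteration (no queue).
--     dirs = ((-1, 0), (1, 0), (0, -1), (0, 1))
--     mark = [[grid[i][j] == '.' and (i in (0, n - 1) or j in (0, m - 1))
--              for j in range(m)] for i in range(n)]
--     for _ in range(n * m):
--         mark = [[mark[i][j] or (grid[i][j] == '.' and any(
--                     0 <= i + di < n and 0 <= j + dj < m and mark[i + di][j + dj]
--                     for di, dj in dirs))
--                  for j in range(m)] for i in range(n)]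
--     return [['.' if grid[i][j] == x and (i in (0, n - 1) or j in (0, m - 1) or any(
--                 0 <= i + di < n and 0 <= j + dj < m and mark[i + di][j + dj]
--                 for di, dj in dirs)) else grid[i][j]
--              for j in range(m)] for i in range(n)]
--
-- def solution(storage, requests):
--     n = len(storage)
--     m = len(storage[0])
--     grid = [list(row[:m]) for row in storage]
--     for x in requests:
--         if len(x) == 1:
--             grid = clear_accessible(grid, x, n, m)
--         else:
--             grid = [['.' if c == x[0] else c for c in row] for row in grid]
--     return sum(c != '.' for row in grid for c in row)
-- ===== Notes on version B (the rewrite author's own statement) =====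
-- stated objective: alternative
-- what changed: remove_one's per-boundary-cell DFS restarts with a mutable visited array and an explicit stack are replaced by a single whole-grid least-fixpoint iteration of a boolean reachability mask (bounded by n*m rounds) followed by one pure rewrite pass; the grid is kept immutable and rebuilt by comprehensions instead of being mutated in place.
import Mathlib
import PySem

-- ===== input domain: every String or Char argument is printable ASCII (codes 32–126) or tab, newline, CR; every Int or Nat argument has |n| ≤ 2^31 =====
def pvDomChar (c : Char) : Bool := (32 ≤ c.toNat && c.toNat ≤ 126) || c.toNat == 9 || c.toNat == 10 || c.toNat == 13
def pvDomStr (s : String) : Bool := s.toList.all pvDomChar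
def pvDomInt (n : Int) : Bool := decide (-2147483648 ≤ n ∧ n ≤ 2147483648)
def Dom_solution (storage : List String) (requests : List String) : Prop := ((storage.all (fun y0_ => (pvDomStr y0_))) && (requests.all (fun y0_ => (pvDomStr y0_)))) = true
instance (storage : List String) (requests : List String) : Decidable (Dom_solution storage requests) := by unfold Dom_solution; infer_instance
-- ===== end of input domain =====

-- B replaces A's per-boundary-cell DFS restarts by one bounded fixpoint iteration of a whole-grid
-- "reachable" mask, then rewrites the grid in a single pass; equivalence is about the RETURN value
-- only (the Python A also mutates its `storage` argument in place, B does not).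

-- shared cell accessors (representation primitives used by both ports)
def ggetA (g : List (List Char)) (i j : Nat) : Char := (g.getD i []).getD j '?'
def gsetA (g : List (List Char)) (i j : Nat) (c : Char) : List (List Char) :=
  g.modify i (fun r => r.set j c)
def vgetA (v : List (List Int)) (i j : Nat) : Int := (v.getD i []).getD j 1
def vsetA (v : List (List Int)) (i j : Nat) (c : Int) : List (List Int) :=
  v.modify i (fun r => r.set j c)


-- ===== PORT A =====

def dxA : List Int := [-1, 1, 0, 0]
def dyA : List Int := [0, 0, -1, 1]

def zerosA (v : List (List Int)) : Nat := (v.map (fun r => r.countP (fun c => c == 0))).sum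

def nbStepA (x : Char) (tx ty : Int)
    (st : List (List Char) × List (List Int) × List (Int × Int)) (d : Int × Int) :
    List (List Char) × List (List Int) × List (Int × Int) :=
  if 0 ≤ tx + d.1 ∧ tx + d.1 < (st.1.length : Int) ∧ 0 ≤ ty + d.2 ∧
      ty + d.2 < ((st.1.headD []).length : Int) ∧ vgetA st.2.1 (tx + d.1).toNat (ty + d.2).toNat = 0 then
    if ggetA st.1 (tx + d.1).toNat (ty + d.2).toNat = '.' then
      (st.1, vsetA st.2.1 (tx + d.1).toNat (ty + d.2).toNat 1, st.2.2 ++ [(tx + d.1, ty + d.2)])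
    else if ggetA st.1 (tx + d.1).toNat (ty + d.2).toNat = x then
      (gsetA st.1 (tx + d.1).toNat (ty + d.2).toNat '.', vsetA st.2.1 (tx + d.1).toNat (ty + d.2).toNat 1, st.2.2)
    else st
  else st

lemma row_set_countP_le (r : List Int) (j : Nat) :
    ((r.set j 1).countP (fun c => c == 0)) ≤ r.countP (fun c => c == 0) := by
  induction r generalizing j with
  | nil => simp
  | cons a t ih =>
    cases j with
    | zero => simp [List.countP_cons]
              try (split <;> omega)
    | succ j => have := ih j
                simp [List.countP_cons]
                omega

lemma row_set_countP_lt (r : List Int) (j : Nat) (h : r.getD j 1 = 0) :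
    ((r.set j 1).countP (fun c => c == 0)) < r.countP (fun c => c == 0) := by
  induction r generalizing j with
  | nil => simp at h
  | cons a t ih =>
    cases j with
    | zero => simp only [List.getD_cons_zero] at h
              subst h
              simp [List.countP_cons]
    | succ j => simp only [List.getD_cons_succ] at h
                have := ih j h
                simp [List.countP_cons]; omega

lemma zerosA_vsetA_le (v : List (List Int)) (i j : Nat) : zerosA (vsetA v i j 1) ≤ zerosA v := by
  induction v generalizing i with
  | nil => simp [vsetA, zerosA]
  | cons r t ih =>
    cases i with
    | zero => simp [vsetA, zerosA, List.modify]
              have := row_set_countP_le r j; omega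
    | succ i => have := ih i
                simp [vsetA, zerosA, List.modify] at *
                omega

lemma zerosA_vsetA_lt (v : List (List Int)) (i j : Nat) (h : vgetA v i j = 0) :
    zerosA (vsetA v i j 1) < zerosA v := by
  induction v generalizing i with
  | nil => simp [vgetA] at h
  | cons r t ih =>
    cases i with
    | zero => simp [vgetA] at h
              simp [vsetA, zerosA, List.modify]
              have := row_set_countP_lt r j h; omega
    | succ i => have := ih i (by simpa [vgetA] using h)
                simp [vsetA, zerosA, List.modify] at *
                omega

def measA (v : List (List Int)) (q : List (Int × Int)) : Nat := 2 * zerosA v + q.length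

lemma nbStepA_meas (x : Char) (tx ty : Int) (st) (d : Int × Int) :
    measA (nbStepA x tx ty st d).2.1 (nbStepA x tx ty st d).2.2 ≤ measA st.2.1 st.2.2 := by
  unfold nbStepA
  split
  · next h =>
    have hlt := zerosA_vsetA_lt st.2.1 (tx + d.1).toNat (ty + d.2).toNat h.2.2.2.2
    split
    · simp [measA]; omega
    · split
      · simp [measA]; omega
      · exact le_refl _
  · exact le_refl _

lemma foldl_nbStepA_meas (x : Char) (tx ty : Int) (l : List (Int × Int)) (st) :
    measA (l.foldl (nbStepA x tx ty) st).2.1 (l.foldl (nbStepA x tx ty) st).2.2 ≤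
      measA st.2.1 st.2.2 := by
  induction l generalizing st with
  | nil => exact le_refl _
  | cons d l ih => exact le_trans (ih _) (nbStepA_meas x tx ty st d)

def dfsLoopA (x : Char) (g : List (List Char)) (v : List (List Int)) (q : List (Int × Int)) :
    List (List Char) × List (List Int) :=
  match q with
  | [] => (g, v)
  | p :: ps =>
    dfsLoopA x
      ((dxA.zip dyA).foldl
        (nbStepA x ((p :: ps).getLast (List.cons_ne_nil p ps)).1 ((p :: ps).getLast (List.cons_ne_nil p ps)).2)
        (g, vsetA v ((p :: ps).getLast (List.cons_ne_nil p ps)).1.toNat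
              ((p :: ps).getLast (List.cons_ne_nil p ps)).2.toNat 1, (p :: ps).dropLast)).1
      ((dxA.zip dyA).foldl
        (nbStepA x ((p :: ps).getLast (List.cons_ne_nil p ps)).1 ((p :: ps).getLast (List.cons_ne_nil p ps)).2)
        (g, vsetA v ((p :: ps).getLast (List.cons_ne_nil p ps)).1.toNat
              ((p :: ps).getLast (List.cons_ne_nil p ps)).2.toNat 1, (p :: ps).dropLast)).2.1
      ((dxA.zip dyA).foldl
        (nbStepA x ((p :: ps).getLast (List.cons_ne_nil p ps)).1 ((p :: ps).getLast (List.cons_ne_nil p ps)).2)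
        (g, vsetA v ((p :: ps).getLast (List.cons_ne_nil p ps)).1.toNat
              ((p :: ps).getLast (List.cons_ne_nil p ps)).2.toNat 1, (p :: ps).dropLast)).2.2
termination_by measA v q
decreasing_by
  have h1 := foldl_nbStepA_meas x ((p :: ps).getLast (List.cons_ne_nil p ps)).1
    ((p :: ps).getLast (List.cons_ne_nil p ps)).2 (dxA.zip dyA)
    (g, vsetA v ((p :: ps).getLast (List.cons_ne_nil p ps)).1.toNat
          ((p :: ps).getLast (List.cons_ne_nil p ps)).2.toNat 1, (p :: ps).dropLast)
  have h2 := zerosA_vsetA_le v ((p :: ps).getLast (List.cons_ne_nil p ps)).1.toNat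
    ((p :: ps).getLast (List.cons_ne_nil p ps)).2.toNat
  simp only [measA] at *
  have h3 : (p :: ps).dropLast.length = ps.length := by simp
  simp only [h3] at h1
  have h4 : (p :: ps).length = ps.length + 1 := by simp
  omega

def scanCellA (x : Char) (n m : Nat) (st : List (List Char) × List (List Int)) (ij : Nat × Nat) :
    List (List Char) × List (List Int) :=
  if (ij.1 = 0 ∨ ij.1 = n - 1 ∨ ij.2 = 0 ∨ ij.2 = m - 1) ∧ vgetA st.2 ij.1 ij.2 = 0 then
    if ggetA st.1 ij.1 ij.2 = x then (gsetA st.1 ij.1 ij.2 '.', vsetA st.2 ij.1 ij.2 1)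
    else if ggetA st.1 ij.1 ij.2 = '.' then
      dfsLoopA x st.1 (vsetA st.2 ij.1 ij.2 1) [((ij.1 : Int), (ij.2 : Int))]
    else st
  else st

def pairsA (n m : Nat) : List (Nat × Nat) :=
  (List.range n).flatMap (fun i => (List.range m).map (fun j => (i, j)))

def removeOneA (g : List (List Char)) (x : Char) (n m : Nat) : List (List Char) :=
  ((pairsA n m).foldl (scanCellA x n m) (g, List.replicate n (List.replicate m (0 : Int)))).1

def removeTwoA (g : List (List Char)) (x0 : Char) (n m : Nat) : List (List Char) :=
  (pairsA n m).foldl (fun g ij => if ggetA g ij.1 ij.2 = x0 then gsetA g ij.1 ij.2 '.' else g) g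

def solution (storage : List String) (requests : List String) : Int :=
  let n := storage.length
  let m := (storage.headD "").toList.length
  let g0 := storage.map (fun s => s.toList)
  let gf := requests.foldl (fun g x =>
      if x.toList.length = 1 then removeOneA g (x.toList.headD '?') n m
      else removeTwoA g (x.toList.headD '?') n m) g0
  (pairsA n m).foldl (fun cnt ij => if ggetA gf ij.1 ij.2 ≠ '.' then cnt + 1 else cnt) (0 : Int)

-- ===== PORT B =====
def dirsB : List (Int × Int) := [(-1, 0), (1, 0), (0, -1), (0, 1)]

def mgetB (mk : List (List Bool)) (i j : Nat) : Bool := (mk.getD i []).getD j false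

def bdryB (n m i j : Nat) : Bool := (i == 0) || (i == n - 1) || (j == 0) || (j == m - 1)

def anyNbB (mk : List (List Bool)) (n m i j : Nat) : Bool :=
  dirsB.any (fun d =>
    decide (0 ≤ (i : Int) + d.1) && decide ((i : Int) + d.1 < (n : Int)) &&
    decide (0 ≤ (j : Int) + d.2) && decide ((j : Int) + d.2 < (m : Int)) &&
    mgetB mk ((i : Int) + d.1).toNat ((j : Int) + d.2).toNat)

def initMarkB (g : List (List Char)) (n m : Nat) : List (List Bool) :=
  (List.range n).map (fun i => (List.range m).map (fun j => (ggetA g i j == '.') && bdryB n m i j))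

def stepMarkB (g : List (List Char)) (n m : Nat) (mk : List (List Bool)) : List (List Bool) :=
  (List.range n).map (fun i => (List.range m).map (fun j =>
    mgetB mk i j || ((ggetA g i j == '.') && anyNbB mk n m i j)))

def clearAccB (g : List (List Char)) (x : Char) (n m : Nat) : List (List Char) :=
  let mk := (List.range (n * m)).foldl (fun mk _ => stepMarkB g n m mk) (initMarkB g n m)
  (List.range n).map (fun i => (List.range m).map (fun j =>
    if (ggetA g i j == x) && (bdryB n m i j || anyNbB mk n m i j) then '.' else ggetA g i j))

def removeTwoB (g : List (List Char)) (x0 : Char) : List (List Char) :=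
  g.map (fun row => row.map (fun c => if c == x0 then '.' else c))

def solution_alt (storage : List String) (requests : List String) : Int :=
  let n := storage.length
  let m := (storage.headD "").toList.length
  let g0 := storage.map (fun s => s.toList.take m)
  let gf := requests.foldl (fun g x =>
      if x.toList.length = 1 then clearAccB g (x.toList.headD '?') n m
      else removeTwoB g (x.toList.headD '?')) g0
  ((gf.map (fun row => (row.filter (fun c => c ≠ '.')).length)).sum : Int)


-- ===== PRECONDITION & SPEC =====
-- Pre_solution excludes exactly the inputs where the Python A raises: an empty storage
-- (storage[0] is an IndexError), a row shorter than the first row (IndexError while scanning),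
-- and an empty request string when the grid has columns (x[0] is an IndexError).
def Pre_solution (storage : List String) (requests : List String) : Prop :=
  storage ≠ [] ∧
  (∀ row ∈ storage, (storage.headD "").toList.length ≤ row.toList.length) ∧
  ((storage.headD "").toList.length = 0 ∨ ∀ r ∈ requests, r.toList.length ≠ 0)

instance (storage : List String) (requests : List String) :
    Decidable (Pre_solution storage requests) := by unfold Pre_solution; infer_instance

def pvWitness_solution : List String × List String := (["A.", ".A"], ["A"])

def Spec_solution (storage : List String) (requests : List String) (out : Int) : Prop :=
  out = solution_alt storage requests
instance (storage : List String) (requests : List String) (out : Int) :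
    Decidable (Spec_solution storage requests out) := by unfold Spec_solution; infer_instance

-- ===== CLAIM (what is proved, stated in full; the proofs are below) =====
def Claim_equal_solution : Prop := ∀ (storage : List String) (requests : List String), Dom_solution storage requests → Pre_solution storage requests → Spec_solution storage requests (solution storage requests)

-- ===== LEMMAS AND PROOFS =====
lemma getD_set {α : Type} (r : List α) (j b : Nat) (c d : α) :
    (r.set j c).getD b d = if j = b ∧ j < r.length then c else r.getD b d := by
  unfold List.getD
  by_cases hjb : j = b
  · subst hjb
    by_cases hj : j < r.length
    · simp [List.getElem?_set_self hj, hj]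
    · rw [List.set_eq_of_length_le (by omega)]
      simp [hj]
  · rw [List.getElem?_set_ne hjb]
    simp [hjb]

lemma getD_modify_set {α : Type} (v : List (List α)) (i j : Nat) (c : α) (a : Nat) :
    ((v.modify i (fun r => r.set j c)).getD a []) =
      if i = a then (v.getD a []).set j c else v.getD a [] := by
  unfold List.getD
  rw [List.getElem?_modify]
  cases h : v[a]? <;> simp [h] <;> split <;> simp

lemma ggetA_gsetA (g : List (List Char)) (i j a b : Nat) (c : Char) :
    ggetA (gsetA g i j c) a b =
      if i = a ∧ j = b ∧ j < (g.getD a []).length then c else ggetA g a b := by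
  unfold ggetA gsetA
  rw [getD_modify_set]
  by_cases hia : i = a
  · subst hia
    rw [if_pos rfl, getD_set]
    by_cases h : j = b ∧ j < (g.getD i []).length
    · obtain ⟨h1, h2⟩ := h
      subst h1
      simp [h2]
    · rw [if_neg h, if_neg (by tauto)]
  · simp [hia]

lemma vgetA_vsetA (v : List (List Int)) (i j a b : Nat) (c : Int) :
    vgetA (vsetA v i j c) a b =
      if i = a ∧ j = b ∧ j < (v.getD a []).length then c else vgetA v a b := by
  unfold vgetA vsetA
  rw [getD_modify_set]
  by_cases hia : i = a
  · subst hia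
    rw [if_pos rfl, getD_set]
    by_cases h : j = b ∧ j < (v.getD i []).length
    · obtain ⟨h1, h2⟩ := h
      subst h1
      simp [h2]
    · rw [if_neg h, if_neg (by tauto)]
  · simp [hia]

lemma length_gsetA (g : List (List Char)) (i j : Nat) (c : Char) :
    (gsetA g i j c).length = g.length := List.length_modify _ _ _

lemma rowlen_gsetA (g : List (List Char)) (i j : Nat) (c : Char) (a : Nat) :
    ((gsetA g i j c).getD a []).length = (g.getD a []).length := by
  unfold gsetA; rw [getD_modify_set]; split <;> simp

lemma length_vsetA (v : List (List Int)) (i j : Nat) (c : Int) :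
    (vsetA v i j c).length = v.length := List.length_modify _ _ _

lemma rowlen_vsetA (v : List (List Int)) (i j : Nat) (c : Int) (a : Nat) :
    ((vsetA v i j c).getD a []).length = (v.getD a []).length := by
  unfold vsetA; rw [getD_modify_set]; split <;> simp

lemma map_range_getD {α : Type} (l : List α) (d : α) :
    (List.range l.length).map (fun i => l.getD i d) = l := by
  induction l using List.reverseRecOn with
  | nil => simp
  | append_singleton t a ih =>
    simp only [List.length_append, List.length_cons, List.length_nil, Nat.add_zero,
      List.range_succ, List.map_append, List.map_cons, List.map_nil]
    have h1 : List.map (fun i => (t ++ [a]).getD i d) (List.range t.length) = t := by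
      conv_rhs => rw [← ih]
      apply List.map_congr_left
      intro i hi
      simp only [List.mem_range] at hi
      simp [List.getD, List.getElem?_append_left hi]
    have h2 : (t ++ [a]).getD t.length d = a := by simp [List.getD]
    rw [h1, h2]

lemma getD_map_range {α : Type} (n : Nat) (f : Nat → α) (d : α) (i : Nat) (h : i < n) :
    ((List.range n).map f).getD i d = f i := by
  simp [List.getD, List.getElem?_map, List.getElem?_range, h]
-- ===== spec-level notions =====
def ShpA (g : List (List Char)) (n m : Nat) : Prop :=
  g.length = n ∧ (∀ i, i < n → m ≤ (g.getD i []).length) ∧ (g.headD []).length = m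

def ShpB (g : List (List Char)) (n m : Nat) : Prop :=
  g.length = n ∧ ∀ i, i < n → (g.getD i []).length = m

def VSh (v : List (List Int)) (n m : Nat) : Prop :=
  v.length = n ∧ ∀ i, i < n → (v.getD i []).length = m

def WEq (g g' : List (List Char)) (n m : Nat) : Prop :=
  ∀ i j, i < n → j < m → ggetA g i j = ggetA g' i j

def Bd (n m i j : Nat) : Prop := i = 0 ∨ i = n - 1 ∨ j = 0 ∨ j = m - 1

def AdjN (i j a b : Nat) : Prop :=
  (a = i + 1 ∧ b = j) ∨ (i = a + 1 ∧ b = j) ∨ (a = i ∧ b = j + 1) ∨ (a = i ∧ j = b + 1)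

inductive ReachP (g : List (List Char)) (n m : Nat) : Nat → Nat → Prop
  | base (i j : Nat) : i < n → j < m → Bd n m i j → ggetA g i j = '.' → ReachP g n m i j
  | step (i j a b : Nat) : ReachP g n m i j → a < n → b < m → AdjN i j a b →
      ggetA g a b = '.' → ReachP g n m a b

def Remv (g : List (List Char)) (n m : Nat) (x : Char) (i j : Nat) : Prop :=
  i < n ∧ j < m ∧ ggetA g i j = x ∧
    (Bd n m i j ∨ ∃ a b, a < n ∧ b < m ∧ AdjN i j a b ∧ ReachP g n m a b)

lemma AdjN_symm {i j a b : Nat} (h : AdjN i j a b) : AdjN a b i j := by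
  unfold AdjN at *; omega

lemma ReachP_inW {g n m i j} (h : ReachP g n m i j) : i < n ∧ j < m := by
  cases h with
  | base i j h1 h2 => exact ⟨h1, h2⟩
  | step i j a b _ h1 h2 => exact ⟨h1, h2⟩

lemma ReachP_dot {g n m i j} (h : ReachP g n m i j) : ggetA g i j = '.' := by
  cases h with
  | base i j _ _ _ hd => exact hd
  | step i j a b _ _ _ _ hd => exact hd

lemma ReachP_congr {g g' : List (List Char)} {n m : Nat} (hW : WEq g g' n m) {i j : Nat}
    (h : ReachP g n m i j) : ReachP g' n m i j := by
  induction h with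
  | base i j h1 h2 h3 h4 => exact ReachP.base i j h1 h2 h3 (by rw [← hW i j h1 h2]; exact h4)
  | step i j a b _ h1 h2 h3 h4 ih => exact ReachP.step i j a b ih h1 h2 h3 (by rw [← hW a b h1 h2]; exact h4)

lemma Remv_congr {g g' : List (List Char)} {n m : Nat} (hW : WEq g g' n m) {x : Char} {i j : Nat}
    (h : Remv g n m x i j) : Remv g' n m x i j := by
  obtain ⟨h1, h2, h3, h4⟩ := h
  refine ⟨h1, h2, by rw [← hW i j h1 h2]; exact h3, ?_⟩
  rcases h4 with h4 | ⟨a, b, ha, hb, hadj, hr⟩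
  · exact Or.inl h4
  · exact Or.inr ⟨a, b, ha, hb, hadj, ReachP_congr hW hr⟩

lemma dirs_zip : dxA.zip dyA = [((-1 : Int), (0 : Int)), (1, 0), (0, -1), (0, 1)] := by
  decide

lemma adj_of_dir {d : Int × Int} (hd : d ∈ dxA.zip dyA) (i j a b : Nat)
    (ha : (a : Int) = (i : Int) + d.1) (hb : (b : Int) = (j : Int) + d.2) : AdjN i j a b := by
  rw [dirs_zip] at hd
  unfold AdjN
  fin_cases hd <;> simp at ha hb <;> omega

lemma dir_of_adj {i j a b : Nat} (h : AdjN i j a b) :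
    ∃ d ∈ dxA.zip dyA, (a : Int) = (i : Int) + d.1 ∧ (b : Int) = (j : Int) + d.2 := by
  rw [dirs_zip]
  rcases h with ⟨h1, h2⟩ | ⟨h1, h2⟩ | ⟨h1, h2⟩ | ⟨h1, h2⟩
  · exact ⟨(1, 0), by simp, by omega, by omega⟩
  · exact ⟨(-1, 0), by simp, by omega, by omega⟩
  · exact ⟨(0, 1), by simp, by omega, by omega⟩
  · exact ⟨(0, -1), by simp, by omega, by omega⟩

lemma mem_pairsA {n m i j : Nat} : (i, j) ∈ pairsA n m ↔ i < n ∧ j < m := by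
  unfold pairsA
  simp [List.mem_flatMap, List.mem_map, List.mem_range]


lemma headD_eq_getD_zero {α : Type} (l : List (List α)) : l.headD [] = l.getD 0 [] := by
  cases l <;> rfl

lemma VSh_vsetA {v : List (List Int)} {n m : Nat} (h : VSh v n m) (i j : Nat) (c : Int) :
    VSh (vsetA v i j c) n m :=
  ⟨(length_vsetA v i j c).trans h.1, fun a ha => (rowlen_vsetA v i j c a).trans (h.2 a ha)⟩

lemma ShpA_gsetA {g : List (List Char)} {n m : Nat} (h : ShpA g n m) (i j : Nat) (c : Char) :
    ShpA (gsetA g i j c) n m := by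
  refine ⟨(length_gsetA g i j c).trans h.1, fun a ha => ?_, ?_⟩
  · rw [rowlen_gsetA]; exact h.2.1 a ha
  · rw [headD_eq_getD_zero, rowlen_gsetA, ← headD_eq_getD_zero]; exact h.2.2

-- ===== A-side invariant =====
structure AInv (g0 : List (List Char)) (x : Char) (n m : Nat)
    (g : List (List Char)) (v : List (List Int)) (q : List (Int × Int))
    (E : List (Nat × Nat)) : Prop where
  shp : ShpA g n m
  vsh : VSh v n m
  unch : ∀ i j, i < n → j < m → vgetA v i j = 0 → ggetA g i j = ggetA g0 i j
  sound : ∀ i j, i < n → j < m → vgetA v i j ≠ 0 →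
      (ggetA g0 i j = '.' ∧ ReachP g0 n m i j ∧ ggetA g i j = '.') ∨
      (ggetA g0 i j = x ∧ Remv g0 n m x i j ∧ ggetA g i j = '.')
  qmem : ∀ p ∈ q, ∃ i j : Nat, p = ((i : Int), (j : Int)) ∧ i < n ∧ j < m ∧
      vgetA v i j ≠ 0 ∧ ggetA g0 i j = '.' ∧ ReachP g0 n m i j
  closed : ∀ i j, i < n → j < m → vgetA v i j ≠ 0 → ggetA g0 i j = '.' →
      ((i : Int), (j : Int)) ∉ q → (i, j) ∉ E →
      ∀ a b, a < n → b < m → AdjN i j a b →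
        (ggetA g0 a b = '.' ∨ ggetA g0 a b = x) → vgetA v a b ≠ 0

lemma nbStepA_inv {g0 : List (List Char)} {x : Char} (hx : x ≠ '.') {n m : Nat}
    {ti tj : Nat} (hti : ti < n) (htj : tj < m) (hR : ReachP g0 n m ti tj)
    {st : List (List Char) × List (List Int) × List (Int × Int)} {E : List (Nat × Nat)}
    {d : Int × Int} (hd : d ∈ dxA.zip dyA)
    (hI : AInv g0 x n m st.1 st.2.1 st.2.2 E) :
    AInv g0 x n m (nbStepA x ti tj st d).1 (nbStepA x ti tj st d).2.1
        (nbStepA x ti tj st d).2.2 E ∧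
    (∀ a b : Nat, vgetA st.2.1 a b ≠ 0 → vgetA (nbStepA x ti tj st d).2.1 a b ≠ 0) ∧
    (∀ p ∈ st.2.2, p ∈ (nbStepA x ti tj st d).2.2) ∧
    (∀ a b : Nat, a < n → b < m → (a : Int) = (ti : Int) + d.1 → (b : Int) = (tj : Int) + d.2 →
      (ggetA g0 a b = '.' ∨ ggetA g0 a b = x) → vgetA (nbStepA x ti tj st d).2.1 a b ≠ 0) := by
  unfold nbStepA
  split_ifs with hc hdot hxx
  case neg =>
    -- cell is neither '.' nor x : state unchanged
    refine ⟨hI, fun a b h => h, fun p hp => hp, ?_⟩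
    intro a b ha hb hca hcb hor
    exfalso
    have ha0 : ((ti : Int) + d.1).toNat = a := by omega
    have hb0 : ((tj : Int) + d.2).toNat = b := by omega
    rw [ha0, hb0] at hc hdot hxx
    have := hI.unch a b ha hb hc.2.2.2.2
    rw [this] at hdot hxx
    tauto
  case neg =>
    -- bounds/visited check failed
    refine ⟨hI, fun a b h => h, fun p hp => hp, ?_⟩
    intro a b ha hb hca hcb _
    intro hv0
    apply hc
    have h1 : st.1.length = n := hI.shp.1
    have h2 : (st.1.headD []).length = m := hI.shp.2.2
    have ha0 : ((ti : Int) + d.1).toNat = a := by omega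
    have hb0 : ((tj : Int) + d.2).toNat = b := by omega
    rw [ha0, hb0, h1, h2]
    refine ⟨by omega, by omega, by omega, by omega, hv0⟩
  case pos =>
    -- '.' neighbour: mark and enqueue
    have h1 : st.1.length = n := hI.shp.1
    have h2 : (st.1.headD []).length = m := hI.shp.2.2
    rw [h1, h2] at hc
    set a0 := ((ti : Int) + d.1).toNat with ha0def
    set b0 := ((tj : Int) + d.2).toNat with hb0def
    have ha0 : a0 < n := by omega
    have hb0 : b0 < m := by omega
    have hcast1 : ((a0 : Nat) : Int) = (ti : Int) + d.1 := by omega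
    have hcast2 : ((b0 : Nat) : Int) = (tj : Int) + d.2 := by omega
    have hadj : AdjN ti tj a0 b0 := adj_of_dir hd ti tj a0 b0 hcast1 hcast2
    have hv0 : vgetA st.2.1 a0 b0 = 0 := hc.2.2.2.2
    have hg0dot : ggetA g0 a0 b0 = '.' := by
      rw [← hI.unch a0 b0 ha0 hb0 hv0]; exact hdot
    have hreach : ReachP g0 n m a0 b0 := ReachP.step ti tj a0 b0 hR ha0 hb0 hadj hg0dot
    have hv' : ∀ a b : Nat, vgetA (vsetA st.2.1 a0 b0 1) a b =
        if a0 = a ∧ b0 = b then 1 else vgetA st.2.1 a b := by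
      intro a b
      rw [vgetA_vsetA]
      by_cases hab : a0 = a ∧ b0 = b
      · obtain ⟨h3, h4⟩ := hab
        subst h3; subst h4
        rw [if_pos ⟨rfl, rfl, by rw [hI.vsh.2 a0 ha0]; exact hb0⟩, if_pos ⟨rfl, rfl⟩]
      · rw [if_neg (by tauto), if_neg hab]
    refine ⟨?_, ?_, ?_, ?_⟩
    · refine ⟨hI.shp, VSh_vsetA hI.vsh a0 b0 1, ?_, ?_, ?_, ?_⟩
      · intro i j hi hj hz
        rw [hv' i j] at hz
        by_cases hab : a0 = i ∧ b0 = j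
        · rw [if_pos hab] at hz; exact absurd hz one_ne_zero
        · rw [if_neg hab] at hz; exact hI.unch i j hi hj hz
      · intro i j hi hj hz
        rw [hv' i j] at hz
        by_cases hab : a0 = i ∧ b0 = j
        · obtain ⟨h3, h4⟩ := hab
          subst h3; subst h4
          exact Or.inl ⟨hg0dot, hreach, hdot⟩
        · rw [if_neg hab] at hz; exact hI.sound i j hi hj hz
      · intro p hp
        rcases List.mem_append.mp hp with hp | hp
        · obtain ⟨i, j, hpe, hi, hj, hnz, hdd, hrr⟩ := hI.qmem p hp
          refine ⟨i, j, hpe, hi, hj, ?_, hdd, hrr⟩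
          rw [hv' i j]; split <;> simp_all
        · simp only [List.mem_singleton] at hp
          refine ⟨a0, b0, by rw [hp, hcast1, hcast2], ha0, hb0, ?_, hg0dot, hreach⟩
          rw [hv' a0 b0, if_pos ⟨rfl, rfl⟩]; exact one_ne_zero
      · intro i j hi hj hnz hdd hnq hnE a b ha hb hadj2 hor
        by_cases hab : a0 = i ∧ b0 = j
        · exfalso
          apply hnq
          apply List.mem_append.mpr
          right
          simp only [List.mem_singleton]
          rw [← hab.1, ← hab.2, hcast1, hcast2]
        · rw [hv' i j, if_neg hab] at hnz
          have hnq' : ((i : Int), (j : Int)) ∉ st.2.2 := fun hmm =>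
            hnq (List.mem_append.mpr (Or.inl hmm))
          have := hI.closed i j hi hj hnz hdd hnq' hnE a b ha hb hadj2 hor
          rw [hv' a b]; split <;> simp_all
    · intro a b hnz
      rw [hv' a b]; split <;> simp_all
    · intro p hp; exact List.mem_append.mpr (Or.inl hp)
    · intro a b ha hb hca hcb hor
      have : a0 = a ∧ b0 = b := by omega
      rw [hv' a b, if_pos this]; exact one_ne_zero
  case pos =>
    -- x neighbour: mark and remove, do not enqueue
    have h1 : st.1.length = n := hI.shp.1
    have h2 : (st.1.headD []).length = m := hI.shp.2.2
    rw [h1, h2] at hc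
    set a0 := ((ti : Int) + d.1).toNat with ha0def
    set b0 := ((tj : Int) + d.2).toNat with hb0def
    have ha0 : a0 < n := by omega
    have hb0 : b0 < m := by omega
    have hcast1 : ((a0 : Nat) : Int) = (ti : Int) + d.1 := by omega
    have hcast2 : ((b0 : Nat) : Int) = (tj : Int) + d.2 := by omega
    have hadj : AdjN ti tj a0 b0 := adj_of_dir hd ti tj a0 b0 hcast1 hcast2
    have hv0 : vgetA st.2.1 a0 b0 = 0 := hc.2.2.2.2
    have hg0x : ggetA g0 a0 b0 = x := by
      rw [← hI.unch a0 b0 ha0 hb0 hv0]; exact hxx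
    have hremv : Remv g0 n m x a0 b0 :=
      ⟨ha0, hb0, hg0x, Or.inr ⟨ti, tj, hti, htj, AdjN_symm hadj, hR⟩⟩
    have hv' : ∀ a b : Nat, vgetA (vsetA st.2.1 a0 b0 1) a b =
        if a0 = a ∧ b0 = b then 1 else vgetA st.2.1 a b := by
      intro a b
      rw [vgetA_vsetA]
      by_cases hab : a0 = a ∧ b0 = b
      · obtain ⟨h3, h4⟩ := hab
        subst h3; subst h4
        rw [if_pos ⟨rfl, rfl, by rw [hI.vsh.2 a0 ha0]; exact hb0⟩, if_pos ⟨rfl, rfl⟩]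
      · rw [if_neg (by tauto), if_neg hab]
    have hg' : ∀ a b : Nat, a < n → b < m → ggetA (gsetA st.1 a0 b0 '.') a b =
        if a0 = a ∧ b0 = b then '.' else ggetA st.1 a b := by
      intro a b ha hb
      rw [ggetA_gsetA]
      by_cases hab : a0 = a ∧ b0 = b
      · obtain ⟨h3, h4⟩ := hab
        subst h3; subst h4
        rw [if_pos ⟨rfl, rfl, by have := hI.shp.2.1 a0 ha0; omega⟩, if_pos ⟨rfl, rfl⟩]
      · rw [if_neg (by tauto), if_neg hab]
    refine ⟨?_, ?_, ?_, ?_⟩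
    · refine ⟨ShpA_gsetA hI.shp a0 b0 '.', VSh_vsetA hI.vsh a0 b0 1, ?_, ?_, ?_, ?_⟩
      · intro i j hi hj hz
        rw [hv' i j] at hz
        by_cases hab : a0 = i ∧ b0 = j
        · rw [if_pos hab] at hz; exact absurd hz one_ne_zero
        · rw [if_neg hab] at hz
          rw [hg' i j hi hj, if_neg hab]
          exact hI.unch i j hi hj hz
      · intro i j hi hj hz
        rw [hv' i j] at hz
        by_cases hab : a0 = i ∧ b0 = j
        · obtain ⟨h3, h4⟩ := hab
          subst h3; subst h4
          refine Or.inr ⟨hg0x, hremv, ?_⟩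
          rw [hg' a0 b0 ha0 hb0, if_pos ⟨rfl, rfl⟩]
        · rw [if_neg hab] at hz
          rcases hI.sound i j hi hj hz with ⟨u1, u2, u3⟩ | ⟨u1, u2, u3⟩
          · exact Or.inl ⟨u1, u2, by rw [hg' i j hi hj, if_neg hab]; exact u3⟩
          · exact Or.inr ⟨u1, u2, by rw [hg' i j hi hj, if_neg hab]; exact u3⟩
      · intro p hp
        obtain ⟨i, j, hpe, hi, hj, hnz, hdd, hrr⟩ := hI.qmem p hp
        refine ⟨i, j, hpe, hi, hj, ?_, hdd, hrr⟩
        rw [hv' i j]; split <;> simp_all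
      · intro i j hi hj hnz hdd hnq hnE a b ha hb hadj2 hor
        by_cases hab : a0 = i ∧ b0 = j
        · exfalso
          rw [← hab.1, ← hab.2] at hdd
          rw [hg0x] at hdd
          exact hx hdd
        · rw [hv' i j, if_neg hab] at hnz
          have := hI.closed i j hi hj hnz hdd hnq hnE a b ha hb hadj2 hor
          rw [hv' a b]; split <;> simp_all
    · intro a b hnz
      rw [hv' a b]; split <;> simp_all
    · intro p hp; exact hp
    · intro a b ha hb hca hcb hor
      have : a0 = a ∧ b0 = b := by omega
      rw [hv' a b, if_pos this]; exact one_ne_zero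


lemma eq_getLast_of_not_mem_dropLast {α : Type} {l : List α} (h : l ≠ []) {p : α}
    (hp : p ∈ l) (hq : p ∉ l.dropLast) : p = l.getLast h := by
  rw [← List.dropLast_append_getLast h] at hp
  rcases List.mem_append.mp hp with h1 | h1
  · exact absurd h1 hq
  · simpa using h1

lemma foldl_nbStepA_inv {g0 : List (List Char)} {x : Char} (hx : x ≠ '.') {n m : Nat}
    {ti tj : Nat} (hti : ti < n) (htj : tj < m) (hR : ReachP g0 n m ti tj)
    (l : List (Int × Int)) (hl : ∀ d ∈ l, d ∈ dxA.zip dyA)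
    (st : List (List Char) × List (List Int) × List (Int × Int)) {E : List (Nat × Nat)}
    (hI : AInv g0 x n m st.1 st.2.1 st.2.2 E) :
    AInv g0 x n m (l.foldl (nbStepA x ti tj) st).1 (l.foldl (nbStepA x ti tj) st).2.1
        (l.foldl (nbStepA x ti tj) st).2.2 E ∧
    (∀ a b : Nat, vgetA st.2.1 a b ≠ 0 → vgetA (l.foldl (nbStepA x ti tj) st).2.1 a b ≠ 0) ∧
    (∀ p ∈ st.2.2, p ∈ (l.foldl (nbStepA x ti tj) st).2.2) ∧
    (∀ d ∈ l, ∀ a b : Nat, a < n → b < m →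
      (a : Int) = (ti : Int) + d.1 → (b : Int) = (tj : Int) + d.2 →
      (ggetA g0 a b = '.' ∨ ggetA g0 a b = x) →
      vgetA (l.foldl (nbStepA x ti tj) st).2.1 a b ≠ 0) := by
  induction l generalizing st with
  | nil => exact ⟨hI, fun a b h => h, fun p hp => hp, by simp⟩
  | cons d l ih =>
    have hstep := nbStepA_inv hx hti htj hR (hl d (by simp)) hI
    obtain ⟨hI1, hmon1, hsub1, hhand1⟩ := hstep
    obtain ⟨hI2, hmon2, hsub2, hhand2⟩ := ih (fun d hd => hl d (by simp [hd])) _ hI1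
    refine ⟨hI2, fun a b h => hmon2 a b (hmon1 a b h), fun p hp => hsub2 p (hsub1 p hp), ?_⟩
    intro e he a b ha hb hca hcb hor
    rcases List.mem_cons.mp he with he | he
    · subst he
      exact hmon2 a b (hhand1 a b ha hb hca hcb hor)
    · exact hhand2 e he a b ha hb hca hcb hor

lemma dfsLoopA_inv {g0 : List (List Char)} {x : Char} (hx : x ≠ '.') {n m : Nat}
    (g : List (List Char)) (v : List (List Int)) (q : List (Int × Int))
    (hI : AInv g0 x n m g v q []) :
    AInv g0 x n m (dfsLoopA x g v q).1 (dfsLoopA x g v q).2 [] [] ∧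
    (∀ a b : Nat, vgetA v a b ≠ 0 → vgetA (dfsLoopA x g v q).2 a b ≠ 0) := by
  fun_induction dfsLoopA x g v q with
  | case1 g v => exact ⟨hI, fun a b h => h⟩
  | case2 g v p ps ih =>
    have hne : (p :: ps) ≠ [] := List.cons_ne_nil p ps
    obtain ⟨ti, tj, hte, hti, htj, htnz, htdot, htR⟩ :=
      hI.qmem ((p :: ps).getLast hne) (List.getLast_mem hne)
    have ht1 : ((p :: ps).getLast hne).1.toNat = ti := by rw [hte]; simp
    have ht2 : ((p :: ps).getLast hne).2.toNat = tj := by rw [hte]; simp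
    have hiff : ∀ a b : Nat, vgetA (vsetA v ti tj 1) a b ≠ 0 ↔ vgetA v a b ≠ 0 := by
      intro a b
      rw [vgetA_vsetA]
      by_cases hab : ti = a ∧ tj = b ∧ tj < (v.getD a []).length
      · rw [if_pos hab]
        obtain ⟨e1, e2, _⟩ := hab
        subst e1; subst e2
        simp [htnz]
      · rw [if_neg hab]
    have hI1 : AInv g0 x n m g (vsetA v ti tj 1) ((p :: ps).dropLast) [(ti, tj)] := by
      refine ⟨hI.shp, VSh_vsetA hI.vsh ti tj 1, ?_, ?_, ?_, ?_⟩
      · intro i j hi hj hz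
        apply hI.unch i j hi hj
        by_contra hnz
        exact absurd hz (by simpa using (hiff i j).mpr hnz)
      · intro i j hi hj hz
        exact hI.sound i j hi hj ((hiff i j).mp hz)
      · intro p' hp'
        obtain ⟨i, j, hpe, hi, hj, hnz, hdd, hrr⟩ :=
          hI.qmem p' (List.dropLast_subset _ hp')
        exact ⟨i, j, hpe, hi, hj, (hiff i j).mpr hnz, hdd, hrr⟩
      · intro i j hi hj hnz hdd hnq hnE a b ha hb hadj2 hor
        have hij : (i, j) ≠ (ti, tj) := by simpa using hnE
        have hnq' : ((i : Int), (j : Int)) ∉ (p :: ps) := by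
          intro hmem
          by_cases hdl : ((i : Int), (j : Int)) ∈ (p :: ps).dropLast
          · exact hnq hdl
          · have hlast := eq_getLast_of_not_mem_dropLast hne hmem hdl
            rw [hte] at hlast
            apply hij
            have h1 : (i : Int) = (ti : Int) := congrArg Prod.fst hlast
            have h2 : (j : Int) = (tj : Int) := congrArg Prod.snd hlast
            have : i = ti := by exact_mod_cast h1
            have : j = tj := by exact_mod_cast h2
            simp_all
        have := hI.closed i j hi hj ((hiff i j).mp hnz) hdd hnq' (by simp)
          a b ha hb hadj2 hor
        exact (hiff a b).mpr this
    obtain ⟨hI2, hmon2, hsub2, hhand2⟩ :=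
      foldl_nbStepA_inv hx hti htj htR (dxA.zip dyA) (fun d hd => hd)
        (g, vsetA v ti tj 1, (p :: ps).dropLast) hI1
    set s := (dxA.zip dyA).foldl (nbStepA x ti tj) (g, vsetA v ti tj 1, (p :: ps).dropLast)
      with hs
    have hI3 : AInv g0 x n m s.1 s.2.1 s.2.2 [] := by
      refine ⟨hI2.shp, hI2.vsh, hI2.unch, hI2.sound, hI2.qmem, ?_⟩
      intro i j hi hj hnz hdd hnq _ a b ha hb hadj2 hor
      by_cases hij : i = ti ∧ j = tj
      · obtain ⟨e1, e2⟩ := hij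
        subst e1; subst e2
        obtain ⟨d, hd, hda, hdb⟩ := dir_of_adj hadj2
        exact hhand2 d hd a b ha hb hda hdb hor
      · exact hI2.closed i j hi hj hnz hdd hnq (by simpa using fun h1 h2 => hij ⟨h1, h2⟩)
          a b ha hb hadj2 hor
    have hrec := ih (by
      rw [ht1, ht2]
      rw [hte]
      exact hI3)
    rw [hte] at hrec
    simp only [Int.toNat_natCast] at hrec
    rw [hte]
    simp only [Int.toNat_natCast]
    exact ⟨hrec.1, fun a b hnz => hrec.2 a b (hmon2 a b ((hiff a b).mpr hnz))⟩



lemma vgetA_replicate (n m i j : Nat) (hi : i < n) (hj : j < m) :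
    vgetA (List.replicate n (List.replicate m (0 : Int))) i j = 0 := by
  unfold vgetA
  simp [List.getD, List.getElem?_replicate, hi, hj]

lemma VSh_replicate (n m : Nat) : VSh (List.replicate n (List.replicate m (0 : Int))) n m := by
  refine ⟨by simp, fun i hi => ?_⟩
  simp [List.getD, List.getElem?_replicate, hi]

lemma scanCellA_inv {g0 : List (List Char)} {x : Char} (hx : x ≠ '.') {n m : Nat}
    {st : List (List Char) × List (List Int)} (hI : AInv g0 x n m st.1 st.2 [] [])
    (ij : Nat × Nat) (hi : ij.1 < n) (hj : ij.2 < m) :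
    AInv g0 x n m (scanCellA x n m st ij).1 (scanCellA x n m st ij).2 [] [] ∧
    (∀ a b : Nat, vgetA st.2 a b ≠ 0 → vgetA (scanCellA x n m st ij).2 a b ≠ 0) ∧
    ((ij.1 = 0 ∨ ij.1 = n - 1 ∨ ij.2 = 0 ∨ ij.2 = m - 1) →
      (ggetA g0 ij.1 ij.2 = '.' ∨ ggetA g0 ij.1 ij.2 = x) →
      vgetA (scanCellA x n m st ij).2 ij.1 ij.2 ≠ 0) := by
  obtain ⟨i, j⟩ := ij
  simp only at hi hj ⊢
  unfold scanCellA
  split_ifs with hc hxx hdot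
  · -- boundary x cell : remove it
    have hv0 : vgetA st.2 i j = 0 := hc.2
    have hg0x : ggetA g0 i j = x := by rw [← hI.unch i j hi hj hv0]; exact hxx
    have hremv : Remv g0 n m x i j := ⟨hi, hj, hg0x, Or.inl hc.1⟩
    have hv' : ∀ a b : Nat, vgetA (vsetA st.2 i j 1) a b =
        if i = a ∧ j = b then 1 else vgetA st.2 a b := by
      intro a b
      rw [vgetA_vsetA]
      by_cases hab : i = a ∧ j = b
      · obtain ⟨e1, e2⟩ := hab
        subst e1; subst e2
        rw [if_pos ⟨rfl, rfl, by rw [hI.vsh.2 i hi]; exact hj⟩, if_pos ⟨rfl, rfl⟩]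
      · rw [if_neg (by tauto), if_neg hab]
    have hg' : ∀ a b : Nat, a < n → b < m → ggetA (gsetA st.1 i j '.') a b =
        if i = a ∧ j = b then '.' else ggetA st.1 a b := by
      intro a b ha hb
      rw [ggetA_gsetA]
      by_cases hab : i = a ∧ j = b
      · obtain ⟨e1, e2⟩ := hab
        subst e1; subst e2
        rw [if_pos ⟨rfl, rfl, by have := hI.shp.2.1 i hi; omega⟩, if_pos ⟨rfl, rfl⟩]
      · rw [if_neg (by tauto), if_neg hab]
    refine ⟨⟨ShpA_gsetA hI.shp i j '.', VSh_vsetA hI.vsh i j 1, ?_, ?_, by simp, ?_⟩, ?_, ?_⟩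
    · intro a b ha hb hz
      rw [hv' a b] at hz
      by_cases hab : i = a ∧ j = b
      · rw [if_pos hab] at hz; exact absurd hz one_ne_zero
      · rw [if_neg hab] at hz
        rw [hg' a b ha hb, if_neg hab]
        exact hI.unch a b ha hb hz
    · intro a b ha hb hz
      rw [hv' a b] at hz
      by_cases hab : i = a ∧ j = b
      · obtain ⟨e1, e2⟩ := hab
        subst e1; subst e2
        refine Or.inr ⟨hg0x, hremv, ?_⟩
        rw [hg' i j hi hj, if_pos ⟨rfl, rfl⟩]
      · rw [if_neg hab] at hz
        rcases hI.sound a b ha hb hz with ⟨u1, u2, u3⟩ | ⟨u1, u2, u3⟩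
        · exact Or.inl ⟨u1, u2, by rw [hg' a b ha hb, if_neg hab]; exact u3⟩
        · exact Or.inr ⟨u1, u2, by rw [hg' a b ha hb, if_neg hab]; exact u3⟩
    · intro a b ha hb hnz hdd _ _ a' b' ha' hb' hadj hor
      by_cases hab : i = a ∧ j = b
      · exfalso
        rw [← hab.1, ← hab.2] at hdd
        rw [hg0x] at hdd
        exact hx hdd
      · rw [hv' a b, if_neg hab] at hnz
        have := hI.closed a b ha hb hnz hdd (by simp) (by simp) a' b' ha' hb' hadj hor
        rw [hv' a' b']; split <;> simp_all
    · intro a b hnz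
      rw [hv' a b]; split <;> simp_all
    · intro _ _
      rw [hv' i j, if_pos ⟨rfl, rfl⟩]; exact one_ne_zero
  · -- boundary '.' cell : flood fill from it
    have hv0 : vgetA st.2 i j = 0 := hc.2
    have hg0dot : ggetA g0 i j = '.' := by rw [← hI.unch i j hi hj hv0]; exact hdot
    have hreach : ReachP g0 n m i j := ReachP.base i j hi hj hc.1 hg0dot
    have hv' : ∀ a b : Nat, vgetA (vsetA st.2 i j 1) a b =
        if i = a ∧ j = b then 1 else vgetA st.2 a b := by
      intro a b
      rw [vgetA_vsetA]
      by_cases hab : i = a ∧ j = b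
      · obtain ⟨e1, e2⟩ := hab
        subst e1; subst e2
        rw [if_pos ⟨rfl, rfl, by rw [hI.vsh.2 i hi]; exact hj⟩, if_pos ⟨rfl, rfl⟩]
      · rw [if_neg (by tauto), if_neg hab]
    have hI1 : AInv g0 x n m st.1 (vsetA st.2 i j 1) [((i : Int), (j : Int))] [] := by
      refine ⟨hI.shp, VSh_vsetA hI.vsh i j 1, ?_, ?_, ?_, ?_⟩
      · intro a b ha hb hz
        rw [hv' a b] at hz
        by_cases hab : i = a ∧ j = b
        · rw [if_pos hab] at hz; exact absurd hz one_ne_zero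
        · rw [if_neg hab] at hz; exact hI.unch a b ha hb hz
      · intro a b ha hb hz
        rw [hv' a b] at hz
        by_cases hab : i = a ∧ j = b
        · obtain ⟨e1, e2⟩ := hab
          subst e1; subst e2
          exact Or.inl ⟨hg0dot, hreach, hdot⟩
        · rw [if_neg hab] at hz; exact hI.sound a b ha hb hz
      · intro p hp
        simp only [List.mem_singleton] at hp
        refine ⟨i, j, hp, hi, hj, ?_, hg0dot, hreach⟩
        rw [hv' i j, if_pos ⟨rfl, rfl⟩]; exact one_ne_zero
      · intro a b ha hb hnz hdd hnq _ a' b' ha' hb' hadj hor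
        by_cases hab : i = a ∧ j = b
        · exfalso
          apply hnq
          simp only [List.mem_singleton]
          rw [← hab.1, ← hab.2]
        · rw [hv' a b, if_neg hab] at hnz
          have := hI.closed a b ha hb hnz hdd (by simp) (by simp) a' b' ha' hb' hadj hor
          rw [hv' a' b']; split <;> simp_all
    obtain ⟨hI2, hmon2⟩ := dfsLoopA_inv hx st.1 (vsetA st.2 i j 1) [((i : Int), (j : Int))] hI1
    refine ⟨hI2, ?_, ?_⟩
    · intro a b hnz
      apply hmon2
      rw [hv' a b]; split <;> simp_all
    · intro _ _
      apply hmon2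
      rw [hv' i j, if_pos ⟨rfl, rfl⟩]; exact one_ne_zero
  · -- boundary cell with some other letter : nothing happens
    refine ⟨hI, fun a b h => h, ?_⟩
    intro _ hor
    exfalso
    have := hI.unch i j hi hj hc.2
    rw [this] at hxx hdot
    tauto
  · -- not a fresh boundary cell
    refine ⟨hI, fun a b h => h, ?_⟩
    intro hbd hor hz
    exact hc ⟨hbd, hz⟩

lemma scan_fold_inv {g0 : List (List Char)} {x : Char} (hx : x ≠ '.') {n m : Nat}
    (l : List (Nat × Nat)) (hl : ∀ p ∈ l, p.1 < n ∧ p.2 < m)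
    (st : List (List Char) × List (List Int)) (hI : AInv g0 x n m st.1 st.2 [] []) :
    AInv g0 x n m (l.foldl (scanCellA x n m) st).1 (l.foldl (scanCellA x n m) st).2 [] [] ∧
    (∀ a b : Nat, vgetA st.2 a b ≠ 0 → vgetA (l.foldl (scanCellA x n m) st).2 a b ≠ 0) ∧
    (∀ p ∈ l, (p.1 = 0 ∨ p.1 = n - 1 ∨ p.2 = 0 ∨ p.2 = m - 1) →
      (ggetA g0 p.1 p.2 = '.' ∨ ggetA g0 p.1 p.2 = x) →
      vgetA (l.foldl (scanCellA x n m) st).2 p.1 p.2 ≠ 0) := by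
  induction l generalizing st with
  | nil => exact ⟨hI, fun a b h => h, by simp⟩
  | cons p l ih =>
    obtain ⟨hp1, hp2⟩ := hl p (by simp)
    obtain ⟨hI1, hmon1, hcov1⟩ := scanCellA_inv hx hI p hp1 hp2
    obtain ⟨hI2, hmon2, hcov2⟩ := ih (fun p hp => hl p (by simp [hp])) _ hI1
    refine ⟨hI2, fun a b h => hmon2 a b (hmon1 a b h), ?_⟩
    intro p' hp' hbd hor
    rcases List.mem_cons.mp hp' with he | he
    · subst he
      exact hmon2 p'.1 p'.2 (hcov1 hbd hor)
    · exact hcov2 p' he hbd hor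

lemma reach_visited {g0 : List (List Char)} {x : Char} {n m : Nat}
    {gf : List (List Char)} {vf : List (List Int)}
    (hI : AInv g0 x n m gf vf [] [])
    (hcov : ∀ p ∈ pairsA n m, (p.1 = 0 ∨ p.1 = n - 1 ∨ p.2 = 0 ∨ p.2 = m - 1) →
      (ggetA g0 p.1 p.2 = '.' ∨ ggetA g0 p.1 p.2 = x) → vgetA vf p.1 p.2 ≠ 0)
    {i j : Nat} (hr : ReachP g0 n m i j) : vgetA vf i j ≠ 0 := by
  induction hr with
  | base i j hi hj hbd hdot =>
    exact hcov (i, j) (mem_pairsA.mpr ⟨hi, hj⟩) hbd (Or.inl hdot)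
  | step i j a b hr ha hb hadj hdot ih =>
    obtain ⟨hi, hj⟩ := ReachP_inW hr
    exact hI.closed i j hi hj ih (ReachP_dot hr) (by simp) (by simp) a b ha hb hadj
      (Or.inl hdot)

lemma removeOneA_spec {g : List (List Char)} {x : Char} (hx : x ≠ '.') {n m : Nat}
    (hsh : ShpA g n m) :
    ShpA (removeOneA g x n m) n m ∧
    (∀ i j, i < n → j < m → Remv g n m x i j → ggetA (removeOneA g x n m) i j = '.') ∧
    (∀ i j, i < n → j < m → ¬ Remv g n m x i j →
      ggetA (removeOneA g x n m) i j = ggetA g i j) := by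
  unfold removeOneA
  have hI0 : AInv g x n m g (List.replicate n (List.replicate m (0 : Int))) [] [] := by
    refine ⟨hsh, VSh_replicate n m, fun _ _ _ _ _ => rfl, ?_, by simp, ?_⟩
    · intro i j hi hj hz
      exact absurd (vgetA_replicate n m i j hi hj) hz
    · intro i j hi hj hz
      exact absurd (vgetA_replicate n m i j hi hj) hz
  obtain ⟨hIf, hmon, hcov⟩ := scan_fold_inv hx (pairsA n m)
    (fun p hp => mem_pairsA.mp (by rwa [← Prod.mk.eta (p := p)] at hp))
    (g, List.replicate n (List.replicate m (0 : Int))) hI0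
  refine ⟨hIf.shp, ?_, ?_⟩
  · intro i j hi hj hremv
    obtain ⟨_, _, hg0x, hcase⟩ := hremv
    have hvis : vgetA ((pairsA n m).foldl (scanCellA x n m)
        (g, List.replicate n (List.replicate m 0))).2 i j ≠ 0 := by
      rcases hcase with hbd | ⟨a, b, ha, hb, hadj, hr⟩
      · exact hcov (i, j) (mem_pairsA.mpr ⟨hi, hj⟩) hbd (Or.inr hg0x)
      · have hvab := reach_visited hIf hcov hr
        exact hIf.closed a b ha hb hvab (ReachP_dot hr) (by simp) (by simp) i j hi hj
          (AdjN_symm hadj) (Or.inr hg0x)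
    rcases hIf.sound i j hi hj hvis with ⟨u1, _, u3⟩ | ⟨_, _, u3⟩
    · rw [u1] at hg0x; exact absurd hg0x.symm hx
    · exact u3
  · intro i j hi hj hnremv
    by_cases hvis : vgetA ((pairsA n m).foldl (scanCellA x n m)
        (g, List.replicate n (List.replicate m 0))).2 i j = 0
    · exact hIf.unch i j hi hj hvis
    · rcases hIf.sound i j hi hj hvis with ⟨u1, _, u3⟩ | ⟨_, u2, _⟩
      · rw [u3, u1]
      · exact absurd u2 hnremv

lemma scan_fold_dot {g0 : List (List Char)} {n m : Nat}
    (l : List (Nat × Nat)) (st : List (List Char) × List (List Int))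
    (hsh : ShpA st.1 n m) (hW : ∀ i j, i < n → j < m → ggetA st.1 i j = ggetA g0 i j) :
    ShpA (l.foldl (scanCellA '.' n m) st).1 n m ∧
    (∀ i j, i < n → j < m →
      ggetA (l.foldl (scanCellA '.' n m) st).1 i j = ggetA g0 i j) := by
  induction l generalizing st with
  | nil => exact ⟨hsh, hW⟩
  | cons p l ih =>
    simp only [List.foldl_cons]
    have hsh' : ShpA (scanCellA '.' n m st p).1 n m := by
      unfold scanCellA
      split_ifs with hc hxx
      · exact ShpA_gsetA hsh p.1 p.2 '.'
      · exact hsh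
      · exact hsh
    have hW' : ∀ i j, i < n → j < m → ggetA (scanCellA '.' n m st p).1 i j = ggetA g0 i j := by
      unfold scanCellA
      split_ifs with hc hxx
      · intro i j hi hj
        rw [ggetA_gsetA]
        split
        · next hcond => rw [← hW i j hi hj, ← hcond.1, ← hcond.2.1]; exact hxx.symm
        · exact hW i j hi hj
      · exact hW
      · exact hW
    exact ih _ hsh' hW'

lemma removeOneA_dot_spec {g : List (List Char)} {n m : Nat} (hsh : ShpA g n m) :
    ShpA (removeOneA g '.' n m) n m ∧
    (∀ i j, i < n → j < m → ggetA (removeOneA g '.' n m) i j = ggetA g i j) := by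
  unfold removeOneA
  exact scan_fold_dot (pairsA n m) _ hsh (fun _ _ _ _ => rfl)

lemma removeTwoA_fold {n m : Nat} (x0 : Char) (l : List (Nat × Nat))
    (st : List (List Char)) (hsh : ShpA st n m) :
    ShpA (l.foldl (fun g ij => if ggetA g ij.1 ij.2 = x0 then gsetA g ij.1 ij.2 '.' else g) st)
      n m ∧
    (∀ i j, i < n → j < m → (i, j) ∈ l → ggetA st i j = x0 →
      ggetA (l.foldl (fun g ij => if ggetA g ij.1 ij.2 = x0 then gsetA g ij.1 ij.2 '.' else g) st)
        i j = '.') ∧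
    (∀ i j, i < n → j < m → ((i, j) ∉ l ∨ ggetA st i j ≠ x0) →
      ggetA (l.foldl (fun g ij => if ggetA g ij.1 ij.2 = x0 then gsetA g ij.1 ij.2 '.' else g) st)
        i j = ggetA st i j) := by
  induction l generalizing st with
  | nil => exact ⟨hsh, by simp, fun _ _ _ _ _ => rfl⟩
  | cons p l ih =>
    obtain ⟨pi, pj⟩ := p
    simp only [List.foldl_cons]
    have hsh' : ShpA (if ggetA st pi pj = x0 then gsetA st pi pj '.' else st) n m := by
      split
      · exact ShpA_gsetA hsh pi pj '.'
      · exact hsh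
    obtain ⟨ih1, ih2, ih3⟩ := ih _ hsh'
    have hval : ∀ i j, i < n → j < m →
        ggetA (if ggetA st pi pj = x0 then gsetA st pi pj '.' else st) i j =
        if (i = pi ∧ j = pj) ∧ ggetA st i j = x0 then '.' else ggetA st i j := by
      intro i j hi hj
      by_cases hab : i = pi ∧ j = pj
      · obtain ⟨e1, e2⟩ := hab
        subst e1; subst e2
        split
        · next hpx =>
          rw [ggetA_gsetA, if_pos ⟨rfl, rfl, by have := hsh.2.1 i hi; omega⟩,
            if_pos ⟨⟨rfl, rfl⟩, hpx⟩]
        · next hpx => rw [if_neg (fun hcc => hpx hcc.2)]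
      · split
        · next hpx =>
          rw [ggetA_gsetA, if_neg (fun hcc => hab ⟨hcc.1.symm, hcc.2.1.symm⟩),
            if_neg (fun hcc => hab hcc.1)]
        · rw [if_neg (fun hcc => hab hcc.1)]
    refine ⟨ih1, ?_, ?_⟩
    · intro i j hi hj hmem hx0
      have hmem' : (i = pi ∧ j = pj) ∨ (i, j) ∈ l := by
        rcases List.mem_cons.mp hmem with he | he
        · left; simpa [Prod.mk.injEq] using he
        · right; exact he
      by_cases hmem2 : (i, j) ∈ l
      · by_cases hdot : x0 = '.'
        · apply ih2 i j hi hj hmem2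
          rw [hval i j hi hj]
          split <;> simp_all
        · by_cases hep : i = pi ∧ j = pj
          · rw [ih3 i j hi hj (Or.inr (by
              rw [hval i j hi hj, if_pos ⟨hep, hx0⟩]
              exact fun hcc => hdot hcc.symm))]
            rw [hval i j hi hj, if_pos ⟨hep, hx0⟩]
          · apply ih2 i j hi hj hmem2
            rw [hval i j hi hj, if_neg (by tauto)]
            exact hx0
      · have hep : i = pi ∧ j = pj := by tauto
        rw [ih3 i j hi hj (Or.inl hmem2), hval i j hi hj, if_pos ⟨hep, hx0⟩]
    · intro i j hi hj hcase
      rcases hcase with hnmem | hneq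
      · have hep : ¬(i = pi ∧ j = pj) := by
          intro he
          exact hnmem (by simp [he.1, he.2])
        have hnl : (i, j) ∉ l := fun he => hnmem (by simp [he])
        rw [ih3 i j hi hj (Or.inl hnl), hval i j hi hj, if_neg (by tauto)]
      · rw [ih3 i j hi hj (Or.inr (by rw [hval i j hi hj, if_neg (by tauto)]; exact hneq))]
        rw [hval i j hi hj, if_neg (by tauto)]

lemma removeTwoA_spec {g : List (List Char)} {x0 : Char} {n m : Nat} (hsh : ShpA g n m) :
    ShpA (removeTwoA g x0 n m) n m ∧
    (∀ i j, i < n → j < m → ggetA g i j = x0 → ggetA (removeTwoA g x0 n m) i j = '.') ∧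
    (∀ i j, i < n → j < m → ggetA g i j ≠ x0 →
      ggetA (removeTwoA g x0 n m) i j = ggetA g i j) := by
  obtain ⟨h1, h2, h3⟩ := removeTwoA_fold x0 (pairsA n m) g hsh
  exact ⟨h1, fun i j hi hj hx0 => h2 i j hi hj (mem_pairsA.mpr ⟨hi, hj⟩) hx0,
    fun i j hi hj hne => h3 i j hi hj (Or.inr hne)⟩

-- ===== B-side =====
def MSh (mk : List (List Bool)) (n m : Nat) : Prop :=
  mk.length = n ∧ ∀ i, i < n → (mk.getD i []).length = m

lemma bdryB_iff {n m i j : Nat} : bdryB n m i j = true ↔ Bd n m i j := by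
  unfold bdryB Bd
  simp
  tauto

lemma mget_build {n m : Nat} (h : Nat → Nat → Bool) {i j : Nat} (hi : i < n) (hj : j < m) :
    mgetB ((List.range n).map (fun i => (List.range m).map (fun j => h i j))) i j = h i j := by
  unfold mgetB
  rw [getD_map_range n _ [] i hi, getD_map_range m _ false j hj]

lemma MSh_build {n m : Nat} (h : Nat → Nat → Bool) :
    MSh ((List.range n).map (fun i => (List.range m).map (fun j => h i j))) n m := by
  refine ⟨by simp, fun i hi => ?_⟩
  rw [getD_map_range n _ [] i hi]
  simp

lemma dirsB_eq : dirsB = dxA.zip dyA := by decide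

lemma anyNbB_iff {mk : List (List Bool)} {n m i j : Nat} :
    anyNbB mk n m i j = true ↔
      ∃ a b : Nat, a < n ∧ b < m ∧ AdjN i j a b ∧ mgetB mk a b = true := by
  unfold anyNbB
  rw [List.any_eq_true]
  constructor
  · rintro ⟨d, hd, hcond⟩
    simp only [Bool.and_eq_true, decide_eq_true_eq] at hcond
    obtain ⟨⟨⟨⟨h1, h2⟩, h3⟩, h4⟩, h5⟩ := hcond
    refine ⟨((i : Int) + d.1).toNat, ((j : Int) + d.2).toNat, by omega, by omega, ?_, h5⟩
    apply adj_of_dir (dirsB_eq ▸ hd)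
    · omega
    · omega
  · rintro ⟨a, b, ha, hb, hadj, hm⟩
    obtain ⟨d, hd, hda, hdb⟩ := dir_of_adj hadj
    refine ⟨d, dirsB_eq ▸ hd, ?_⟩
    simp only [Bool.and_eq_true, decide_eq_true_eq]
    have e1 : ((i : Int) + d.1).toNat = a := by omega
    have e2 : ((j : Int) + d.2).toNat = b := by omega
    exact ⟨⟨⟨⟨by omega, by omega⟩, by omega⟩, by omega⟩, by rw [e1, e2]; exact hm⟩

lemma initMarkB_sound {g : List (List Char)} {n m : Nat} :
    ∀ i j, i < n → j < m → mgetB (initMarkB g n m) i j = true → ReachP g n m i j := by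
  intro i j hi hj hm
  unfold initMarkB at hm
  rw [mget_build _ hi hj] at hm
  simp only [Bool.and_eq_true, beq_iff_eq] at hm
  exact ReachP.base i j hi hj (bdryB_iff.mp hm.2) hm.1

lemma stepMarkB_sound {g : List (List Char)} {n m : Nat} {mk : List (List Bool)}
    (hS : ∀ i j, i < n → j < m → mgetB mk i j = true → ReachP g n m i j) :
    ∀ i j, i < n → j < m → mgetB (stepMarkB g n m mk) i j = true → ReachP g n m i j := by
  intro i j hi hj hm
  unfold stepMarkB at hm
  rw [mget_build _ hi hj] at hm
  simp only [Bool.or_eq_true, Bool.and_eq_true, beq_iff_eq] at hm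
  rcases hm with hm | ⟨hdot, hany⟩
  · exact hS i j hi hj hm
  · obtain ⟨a, b, ha, hb, hadj, hmab⟩ := anyNbB_iff.mp hany
    exact ReachP.step a b i j (hS a b ha hb hmab) hi hj (AdjN_symm hadj) hdot

lemma stepMarkB_expand {g : List (List Char)} {n m : Nat} {mk : List (List Bool)}
    {i j : Nat} (hi : i < n) (hj : j < m) (hm : mgetB mk i j = true) :
    mgetB (stepMarkB g n m mk) i j = true := by
  unfold stepMarkB
  rw [mget_build _ hi hj]
  simp [hm]

lemma MSh_stepMarkB {g : List (List Char)} {n m : Nat} (mk : List (List Bool)) :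
    MSh (stepMarkB g n m mk) n m := MSh_build _

lemma MSh_initMarkB {g : List (List Char)} {n m : Nat} : MSh (initMarkB g n m) n m :=
  MSh_build _

lemma foldl_const_iterate {α : Type} (f : α → α) (k : Nat) (s : α) :
    (List.range k).foldl (fun s _ => f s) s = f^[k] s := by
  induction k with
  | zero => simp
  | succ k ih =>
    rw [List.range_succ, List.foldl_append, ih, Function.iterate_succ_apply']
    rfl

def cntM (mk : List (List Bool)) : Nat := (mk.map (fun r => r.countP id)).sum

lemma rows_le (ra rb : List Bool) (hlen : ra.length = rb.length)
    (himp : ∀ j, j < ra.length → ra.getD j false = true → rb.getD j false = true) :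
    ra.countP id ≤ rb.countP id ∧ (ra ≠ rb → ra.countP id < rb.countP id) := by
  induction ra generalizing rb with
  | nil =>
    cases rb with
    | nil => simp
    | cons b tb => simp at hlen
  | cons a ta ih =>
    cases rb with
    | nil => simp at hlen
    | cons b tb =>
      have hlen' : ta.length = tb.length := by simpa using hlen
      have himp' : ∀ j, j < ta.length → ta.getD j false = true → tb.getD j false = true := by
        intro j hj h
        have := himp (j + 1) (by simpa using hj)
        simpa using this h
      obtain ⟨ihle, ihlt⟩ := ih tb hlen' himp'
      have hhead := himp 0 (by simp)
      simp only [List.getD_cons_zero] at hhead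
      simp only [List.countP_cons, id_eq]
      cases a with
      | true =>
        have hb : b = true := hhead rfl
        subst hb
        refine ⟨by simp; omega, fun hne => ?_⟩
        have hta : ta ≠ tb := by simpa using hne
        have := ihlt hta
        simp
        omega
      | false =>
        cases b with
        | true =>
          refine ⟨by simp; omega, fun _ => by simp; omega⟩
        | false =>
          refine ⟨by simp; omega, fun hne => ?_⟩
          have hta : ta ≠ tb := by simpa using hne
          have := ihlt hta
          simp
          omega

lemma grids_le : ∀ (a b : List (List Bool)), a.length = b.length →
    (∀ i, i < a.length → (a.getD i []).length = (b.getD i []).length) →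
    (∀ i j, i < a.length → j < (a.getD i []).length →
      (a.getD i []).getD j false = true → (b.getD i []).getD j false = true) →
    cntM a ≤ cntM b ∧ (a ≠ b → cntM a < cntM b) := by
  intro a
  induction a with
  | nil =>
    intro b hlen _ _
    cases b with
    | nil => simp
    | cons rb tb => simp at hlen
  | cons ra ta ih =>
    intro b hlen hrows himp
    cases b with
    | nil => simp at hlen
    | cons rb tb =>
      have hlen' : ta.length = tb.length := by simpa using hlen
      have hrows' : ∀ i, i < ta.length → (ta.getD i []).length = (tb.getD i []).length := by
        intro i hi
        have := hrows (i + 1) (by simpa using hi)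
        simpa using this
      have himp' : ∀ i j, i < ta.length → j < (ta.getD i []).length →
          (ta.getD i []).getD j false = true → (tb.getD i []).getD j false = true := by
        intro i j hi hj h
        have := himp (i + 1) j (by simpa using hi) (by simpa using hj)
        simpa using this h
      obtain ⟨tle, tlt⟩ := ih tb hlen' hrows' himp'
      have hrow0 := rows_le ra rb (by simpa using hrows 0 (by simp))
        (fun j hj h => by simpa using himp 0 j (by simp) (by simpa using hj) (by simpa using h))
      simp only [cntM, List.map_cons, List.sum_cons] at *
      constructor
      · omega
      · intro hne
        by_cases hra : ra = rb
        · subst hra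
          have : ta ≠ tb := by simpa using hne
          have := tlt this
          omega
        · have := hrow0.2 hra
          omega

lemma cnt_le_nm : ∀ (mk : List (List Bool)) (m : Nat), (∀ r ∈ mk, r.length = m) →
    cntM mk ≤ mk.length * m := by
  intro mk
  induction mk with
  | nil => simp [cntM]
  | cons r t ih =>
    intro m hr
    have h1 : r.countP id ≤ m := by
      rw [← hr r (by simp)]
      exact List.countP_le_length
    have h2 := ih m (fun r hrr => hr r (by simp [hrr]))
    simp only [cntM, List.map_cons, List.sum_cons, List.length_cons] at *
    have : (t.length + 1) * m = t.length * m + m := by ring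
    omega

lemma all_of_cnt_full : ∀ (mk : List (List Bool)) (m : Nat), (∀ r ∈ mk, r.length = m) →
    cntM mk = mk.length * m → ∀ r ∈ mk, ∀ c ∈ r, c = true := by
  intro mk
  induction mk with
  | nil => simp
  | cons r t ih =>
    intro m hr hcnt
    have h1 : r.countP id ≤ m := by
      rw [← hr r (by simp)]
      exact List.countP_le_length
    have h2 := cnt_le_nm t m (fun r hrr => hr r (by simp [hrr]))
    simp only [cntM, List.map_cons, List.sum_cons, List.length_cons] at hcnt
    have hmul : (t.length + 1) * m = t.length * m + m := by ring
    have hrfull : r.countP id = r.length := by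
      rw [hr r (by simp)]
      simp only [cntM] at h2
      omega
    have htfull : cntM t = t.length * m := by
      simp only [cntM] at *
      omega
    intro r' hr' c hc
    rcases List.mem_cons.mp hr' with he | he
    · subst he
      have := List.countP_eq_length.mp hrfull
      simpa using this c hc
    · exact ih m (fun r hrr => hr r (by simp [hrr])) htfull r' he c hc

lemma mem_getD {α : Type} {l : List α} {i : Nat} (d : α) (h : i < l.length) :
    l.getD i d ∈ l := by
  rw [List.getD, List.getElem?_eq_getElem h]
  exact List.getElem_mem h

lemma MSh_iter {g : List (List Char)} {n m : Nat} (k : Nat) :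
    MSh ((stepMarkB g n m)^[k] (initMarkB g n m)) n m := by
  induction k with
  | zero => exact MSh_initMarkB
  | succ k ih =>
    rw [Function.iterate_succ_apply']
    exact MSh_stepMarkB _

lemma sound_iter {g : List (List Char)} {n m : Nat} (k : Nat) :
    ∀ i j, i < n → j < m →
      mgetB ((stepMarkB g n m)^[k] (initMarkB g n m)) i j = true → ReachP g n m i j := by
  induction k with
  | zero => exact initMarkB_sound
  | succ k ih =>
    rw [Function.iterate_succ_apply']
    exact stepMarkB_sound ih

lemma iter_expand {g : List (List Char)} {n m : Nat} (k : Nat) :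
    ∀ (s : List (List Bool)) (i j : Nat), i < n → j < m → mgetB s i j = true →
      mgetB ((stepMarkB g n m)^[k] s) i j = true := by
  induction k with
  | zero => intro s i j _ _ h; exact h
  | succ k ih =>
    intro s i j hi hj h
    rw [Function.iterate_succ_apply]
    exact ih _ i j hi hj (stepMarkB_expand hi hj h)

lemma mget_stepMarkB {g : List (List Char)} {n m : Nat} {mk : List (List Bool)}
    {i j : Nat} (hi : i < n) (hj : j < m) :
    mgetB (stepMarkB g n m mk) i j =
      (mgetB mk i j || ((ggetA g i j == '.') && anyNbB mk n m i j)) := by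
  unfold stepMarkB
  rw [mget_build _ hi hj]

lemma mark_complete {g : List (List Char)} {n m : Nat} :
    ∀ i j, i < n → j < m → ReachP g n m i j →
      mgetB ((stepMarkB g n m)^[n * m] (initMarkB g n m)) i j = true := by
  by_cases hfix : ∃ k, k ≤ n * m ∧
      stepMarkB g n m ((stepMarkB g n m)^[k] (initMarkB g n m)) =
        (stepMarkB g n m)^[k] (initMarkB g n m)
  · obtain ⟨k, hk, hfx⟩ := hfix
    have hF : (stepMarkB g n m)^[n * m] (initMarkB g n m) =
        (stepMarkB g n m)^[k] (initMarkB g n m) := by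
      have he : n * m = (n * m - k) + k := by omega
      rw [he, Function.iterate_add_apply, Function.iterate_fixed hfx]
    intro i j hi hj hr
    rw [hF]
    induction hr with
    | base i j hi hj hbd hdot =>
      apply iter_expand
      · exact hi
      · exact hj
      · unfold initMarkB
        rw [mget_build _ hi hj]
        simp [hdot, bdryB_iff.mpr hbd]
    | step i j a b hr ha hb hadj hdot ih =>
      obtain ⟨hi', hj'⟩ := ReachP_inW hr
      rw [← hfx, mget_stepMarkB ha hb]
      simp only [Bool.or_eq_true, Bool.and_eq_true]
      exact Or.inr ⟨beq_iff_eq.mpr hdot,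
        anyNbB_iff.mpr ⟨i, j, hi', hj', AdjN_symm hadj, ih hi' hj'⟩⟩
  · push_neg at hfix
    have hcnt : ∀ k, k ≤ n * m →
        k ≤ cntM ((stepMarkB g n m)^[k] (initMarkB g n m)) := by
      intro k
      induction k with
      | zero => intro _; exact Nat.zero_le _
      | succ k ih =>
        intro hk1
        have hk : k ≤ n * m := by omega
        have hM1 : MSh ((stepMarkB g n m)^[k] (initMarkB g n m)) n m := MSh_iter k
        have hM2 : MSh ((stepMarkB g n m)^[k + 1] (initMarkB g n m)) n m := MSh_iter (k + 1)
        have hstep : (stepMarkB g n m)^[k + 1] (initMarkB g n m) =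
            stepMarkB g n m ((stepMarkB g n m)^[k] (initMarkB g n m)) :=
          Function.iterate_succ_apply' _ _ _
        have hne : (stepMarkB g n m)^[k] (initMarkB g n m) ≠
            (stepMarkB g n m)^[k + 1] (initMarkB g n m) := by
          rw [hstep]
          exact fun he => hfix k hk he.symm
        have hlt := (grids_le ((stepMarkB g n m)^[k] (initMarkB g n m))
          ((stepMarkB g n m)^[k + 1] (initMarkB g n m))
          (by rw [hM1.1, hM2.1])
          (by
            intro i hi
            rw [hM1.1] at hi
            rw [hM1.2 i hi, hM2.2 i hi])
          (by
            intro i j hi hj h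
            rw [hM1.1] at hi
            rw [hM1.2 i hi] at hj
            have := stepMarkB_expand (g := g) hi hj h
            rw [hstep]
            exact this)).2 hne
        omega
    have hrows : ∀ r ∈ (stepMarkB g n m)^[n * m] (initMarkB g n m), r.length = m := by
      intro r hr
      have hM := MSh_iter (g := g) (n := n) (m := m) (n * m)
      obtain ⟨i, hi, he⟩ := List.mem_iff_getElem.mp hr
      have hi' : i < n := by rw [← hM.1]; exact hi
      have := hM.2 i hi'
      rw [List.getD, List.getElem?_eq_getElem hi] at this
      simp only [Option.getD_some] at this
      rw [he] at this
      exact this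
    have hle := cnt_le_nm ((stepMarkB g n m)^[n * m] (initMarkB g n m)) m hrows
    have hM := MSh_iter (g := g) (n := n) (m := m) (n * m)
    have hcnteq : cntM ((stepMarkB g n m)^[n * m] (initMarkB g n m)) =
        ((stepMarkB g n m)^[n * m] (initMarkB g n m)).length * m := by
      have := hcnt (n * m) (le_refl _)
      rw [hM.1] at hle ⊢
      omega
    have hfull := all_of_cnt_full _ m hrows hcnteq
    intro i j hi hj _
    have hrow : ((stepMarkB g n m)^[n * m] (initMarkB g n m)).getD i [] ∈
        (stepMarkB g n m)^[n * m] (initMarkB g n m) := mem_getD [] (by rw [hM.1]; exact hi)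
    have hc : (((stepMarkB g n m)^[n * m] (initMarkB g n m)).getD i []).getD j false ∈
        ((stepMarkB g n m)^[n * m] (initMarkB g n m)).getD i [] :=
      mem_getD false (by rw [hM.2 i hi]; exact hj)
    exact hfull _ hrow _ hc

lemma gget_build {n m : Nat} (h : Nat → Nat → Char) {i j : Nat} (hi : i < n) (hj : j < m) :
    ggetA ((List.range n).map (fun i => (List.range m).map (fun j => h i j))) i j = h i j := by
  unfold ggetA
  rw [getD_map_range n _ [] i hi, getD_map_range m _ '?' j hj]

lemma ShpB_build {n m : Nat} (h : Nat → Nat → Char) :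
    ShpB ((List.range n).map (fun i => (List.range m).map (fun j => h i j))) n m := by
  refine ⟨by simp, fun i hi => ?_⟩
  rw [getD_map_range n _ [] i hi]
  simp

lemma clearAccB_spec {g : List (List Char)} {x : Char} {n m : Nat} (hsh : ShpB g n m) :
    ShpB (clearAccB g x n m) n m ∧
    (∀ i j, i < n → j < m → Remv g n m x i j → ggetA (clearAccB g x n m) i j = '.') ∧
    (∀ i j, i < n → j < m → ¬ Remv g n m x i j →
      ggetA (clearAccB g x n m) i j = ggetA g i j) := by
  have hiter : clearAccB g x n m = (List.range n).map (fun i => (List.range m).map (fun j =>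
      if (ggetA g i j == x) && (bdryB n m i j ||
          anyNbB ((stepMarkB g n m)^[n * m] (initMarkB g n m)) n m i j) then '.'
      else ggetA g i j)) := by
    unfold clearAccB
    rw [foldl_const_iterate (stepMarkB g n m) (n * m) (initMarkB g n m)]
  have hcond : ∀ i j, i < n → j < m →
      (((ggetA g i j == x) && (bdryB n m i j ||
        anyNbB ((stepMarkB g n m)^[n * m] (initMarkB g n m)) n m i j)) = true ↔
        Remv g n m x i j) := by
    intro i j hi hj
    simp only [Bool.and_eq_true, Bool.or_eq_true, beq_iff_eq]
    constructor
    · rintro ⟨hx, hbd | hany⟩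
      · exact ⟨hi, hj, hx, Or.inl (bdryB_iff.mp hbd)⟩
      · obtain ⟨a, b, ha, hb, hadj, hm⟩ := anyNbB_iff.mp hany
        exact ⟨hi, hj, hx, Or.inr ⟨a, b, ha, hb, hadj, sound_iter (n * m) a b ha hb hm⟩⟩
    · rintro ⟨_, _, hx, hbd | ⟨a, b, ha, hb, hadj, hr⟩⟩
      · exact ⟨hx, Or.inl (bdryB_iff.mpr hbd)⟩
      · exact ⟨hx, Or.inr (anyNbB_iff.mpr ⟨a, b, ha, hb, hadj,
          mark_complete a b ha hb hr⟩)⟩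
  rw [hiter]
  refine ⟨ShpB_build _, ?_, ?_⟩
  · intro i j hi hj hremv
    rw [gget_build _ hi hj, if_pos ((hcond i j hi hj).mpr hremv)]
  · intro i j hi hj hnremv
    rw [gget_build _ hi hj, if_neg (fun hc => hnremv ((hcond i j hi hj).mp hc))]

lemma getD_map_row {α β : Type} (φ : α → β) (l : List α) {i : Nat} (hi : i < l.length)
    (d : β) (d' : α) : (l.map φ).getD i d = φ (l.getD i d') := by
  rw [List.getD, List.getD, List.getElem?_map, List.getElem?_eq_getElem hi]
  simp

lemma gget_map_map {g : List (List Char)} (f : Char → Char) {i j : Nat}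
    (hi : i < g.length) (hj : j < (g.getD i []).length) :
    ggetA (g.map (fun row => row.map f)) i j = f (ggetA g i j) := by
  have h1 : (g.map (fun row => row.map f)).getD i [] = (g.getD i []).map f := by
    rw [List.getD, List.getD, List.getElem?_map, List.getElem?_eq_getElem hi]
    simp
  unfold ggetA
  rw [h1]
  exact getD_map_row f (g.getD i []) hj '?' '?' 

lemma removeTwoB_spec {g : List (List Char)} {x0 : Char} {n m : Nat} (hsh : ShpB g n m) :
    ShpB (removeTwoB g x0) n m ∧
    (∀ i j, i < n → j < m →
      ggetA (removeTwoB g x0) i j = if ggetA g i j == x0 then '.' else ggetA g i j) := by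
  refine ⟨⟨by simp [removeTwoB, hsh.1], fun i hi => ?_⟩, ?_⟩
  · unfold removeTwoB
    have h1 : (g.map (fun row => row.map (fun c => if c == x0 then '.' else c))).getD i [] =
        (g.getD i []).map (fun c => if c == x0 then '.' else c) := by
      rw [List.getD, List.getD, List.getElem?_map,
        List.getElem?_eq_getElem (by rw [hsh.1]; exact hi)]
      simp
    rw [h1]
    rw [List.length_map]
    exact hsh.2 i hi
  · intro i j hi hj
    unfold removeTwoB
    rw [gget_map_map _ (by rw [hsh.1]; exact hi) (by rw [hsh.2 i hi]; exact hj)]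

-- ===== top level =====
lemma WEq_symm {g g' : List (List Char)} {n m : Nat} (h : WEq g g' n m) : WEq g' g n m :=
  fun i j hi hj => (h i j hi hj).symm

lemma step_one_rel {n m : Nat} {gA gB : List (List Char)} (hA : ShpA gA n m)
    (hB : ShpB gB n m) (hW : WEq gA gB n m) (x : Char) :
    ShpA (removeOneA gA x n m) n m ∧ ShpB (clearAccB gB x n m) n m ∧
    WEq (removeOneA gA x n m) (clearAccB gB x n m) n m := by
  obtain ⟨hB1, hB2, hB3⟩ := clearAccB_spec (g := gB) (x := x) hB
  by_cases hx : x = '.'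
  · subst hx
    obtain ⟨hA1, hA2⟩ := removeOneA_dot_spec hA
    refine ⟨hA1, hB1, ?_⟩
    intro i j hi hj
    rw [hA2 i j hi hj]
    by_cases hrem : Remv gB n m '.' i j
    · rw [hB2 i j hi hj hrem, hW i j hi hj, hrem.2.2.1]
    · rw [hB3 i j hi hj hrem, hW i j hi hj]
  · obtain ⟨hA1, hA2, hA3⟩ := removeOneA_spec hx hA
    refine ⟨hA1, hB1, ?_⟩
    intro i j hi hj
    by_cases hrem : Remv gA n m x i j
    · rw [hA2 i j hi hj hrem, hB2 i j hi hj (Remv_congr hW hrem)]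
    · rw [hA3 i j hi hj hrem, hB3 i j hi hj (fun hr => hrem (Remv_congr (WEq_symm hW) hr)),
        hW i j hi hj]

lemma step_two_rel {n m : Nat} {gA gB : List (List Char)} (hA : ShpA gA n m)
    (hB : ShpB gB n m) (hW : WEq gA gB n m) (x0 : Char) :
    ShpA (removeTwoA gA x0 n m) n m ∧ ShpB (removeTwoB gB x0) n m ∧
    WEq (removeTwoA gA x0 n m) (removeTwoB gB x0) n m := by
  obtain ⟨hA1, hA2, hA3⟩ := removeTwoA_spec (g := gA) (x0 := x0) hA
  obtain ⟨hB1, hB2⟩ := removeTwoB_spec (g := gB) (x0 := x0) hB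
  refine ⟨hA1, hB1, ?_⟩
  intro i j hi hj
  rw [hB2 i j hi hj]
  by_cases hx0 : ggetA gA i j = x0
  · rw [hA2 i j hi hj hx0, if_pos (by rw [← hW i j hi hj]; exact beq_iff_eq.mpr hx0)]
  · rw [hA3 i j hi hj hx0, if_neg (by
      rw [← hW i j hi hj]
      simpa using hx0), hW i j hi hj]

lemma requests_fold_rel {n m : Nat} (reqs : List String) :
    ∀ (gA gB : List (List Char)), ShpA gA n m → ShpB gB n m → WEq gA gB n m →
    ShpA (reqs.foldl (fun g x =>
        if x.toList.length = 1 then removeOneA g (x.toList.headD '?') n m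
        else removeTwoA g (x.toList.headD '?') n m) gA) n m ∧
    ShpB (reqs.foldl (fun g x =>
        if x.toList.length = 1 then clearAccB g (x.toList.headD '?') n m
        else removeTwoB g (x.toList.headD '?')) gB) n m ∧
    WEq (reqs.foldl (fun g x =>
        if x.toList.length = 1 then removeOneA g (x.toList.headD '?') n m
        else removeTwoA g (x.toList.headD '?') n m) gA)
      (reqs.foldl (fun g x =>
        if x.toList.length = 1 then clearAccB g (x.toList.headD '?') n m
        else removeTwoB g (x.toList.headD '?')) gB) n m := by
  induction reqs with
  | nil => intro gA gB hA hB hW; exact ⟨hA, hB, hW⟩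
  | cons r reqs ih =>
    intro gA gB hA hB hW
    simp only [List.foldl_cons]
    by_cases hr : r.toList.length = 1
    · rw [if_pos hr, if_pos hr]
      obtain ⟨h1, h2, h3⟩ := step_one_rel hA hB hW (r.toList.headD '?')
      exact ih _ _ h1 h2 h3
    · rw [if_neg hr, if_neg hr]
      obtain ⟨h1, h2, h3⟩ := step_two_rel hA hB hW (r.toList.headD '?')
      exact ih _ _ h1 h2 h3

lemma countP_flatMap_sum {α β : Type} (f : α → List β) (l : List α) (p : β → Bool) :
    (l.flatMap f).countP p = (l.map (fun a => (f a).countP p)).sum := by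
  induction l with
  | nil => simp
  | cons a t ih => simp [List.countP_append, ih]

lemma getD_take {α : Type} (l : List α) (m j : Nat) (hj : j < m) (d : α) :
    (l.take m).getD j d = l.getD j d := by
  rw [List.getD, List.getD, List.getElem?_take]
  simp [hj]

lemma sum_len_cast (gB : List (List Char)) :
    (gB.map (fun row => ((row.filter (fun c => c ≠ '.')).length : Int))).sum =
      (((gB.map (fun row => (row.filter (fun c => c ≠ '.')).length)).sum : Nat) : Int) := by
  induction gB with
  | nil => simp
  | cons r t ih =>
    simp only [List.map_cons, List.sum_cons, ih, Nat.cast_add]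

lemma count_eq {n m : Nat} {gA gB : List (List Char)} (hA : ShpA gA n m)
    (hB : ShpB gB n m) (hW : WEq gA gB n m) :
    (pairsA n m).foldl
        (fun cnt ij => if ggetA gA ij.1 ij.2 ≠ '.' then cnt + 1 else cnt) (0 : Int) =
      (gB.map (fun row => ((row.filter (fun c => c ≠ '.')).length : Int))).sum := by
  have hfoldl : (pairsA n m).foldl
      (fun cnt ij => if ggetA gA ij.1 ij.2 ≠ '.' then cnt + 1 else cnt) (0 : Int) =
      0 + ((pairsA n m).countP (fun ij => !(ggetA gA ij.1 ij.2 == '.')) : Int) := by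
    rw [← PySem.List.foldl_count_if (fun ij => !(ggetA gA ij.1 ij.2 == '.')) (pairsA n m) 0]
    apply PySem.List.foldl_congr_mem
    intro acc ij _
    by_cases h : ggetA gA ij.1 ij.2 = '.' <;> simp [h]
  rw [hfoldl, zero_add]
  have hrowB : ∀ i, i < n → (gB.getD i []).countP (fun c => decide (c ≠ '.')) =
      (List.range m).countP (fun j => !(ggetA gA i j == '.')) := by
    intro i hi
    have hlen : (gB.getD i []).length = m := hB.2 i hi
    conv_lhs => rw [← map_range_getD (gB.getD i []) '?', hlen]
    rw [List.countP_map]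
    apply List.countP_congr
    intro j hj
    simp only [List.mem_range] at hj
    have : (gB.getD i []).getD j '?' = ggetA gB i j := rfl
    rw [Function.comp_apply, this, ← hW i j hi hj]
    by_cases h : ggetA gA i j = '.' <;> simp [h]
  have hA' : (pairsA n m).countP (fun ij => !(ggetA gA ij.1 ij.2 == '.')) =
      ((List.range n).map (fun i =>
        (List.range m).countP (fun j => !(ggetA gA i j == '.')))).sum := by
    unfold pairsA
    rw [countP_flatMap_sum]
    congr 1
    apply List.map_congr_left
    intro i _
    rw [List.countP_map]
    rfl
  have hB' : (gB.map (fun row => (row.filter (fun c => c ≠ '.')).length)).sum =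
      ((List.range n).map (fun i =>
        (List.range m).countP (fun j => !(ggetA gA i j == '.')))).sum := by
    conv_lhs => rw [← map_range_getD gB [], hB.1, List.map_map]
    congr 1
    apply List.map_congr_left
    intro i hi
    simp only [List.mem_range] at hi
    rw [Function.comp_apply, ← List.countP_eq_length_filter, hrowB i hi]
  rw [sum_len_cast, hA', hB']

lemma init_rel (storage : List String) (hne : storage ≠ [])
    (hrows : ∀ row ∈ storage, (storage.headD "").toList.length ≤ row.toList.length) :
    ShpA (storage.map (fun s => s.toList)) storage.length (storage.headD "").toList.length ∧
    ShpB (storage.map (fun s => s.toList.take (storage.headD "").toList.length))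
      storage.length (storage.headD "").toList.length ∧
    WEq (storage.map (fun s => s.toList))
      (storage.map (fun s => s.toList.take (storage.headD "").toList.length))
      storage.length (storage.headD "").toList.length := by
  set m := (storage.headD "").toList.length with hm
  have hrow : ∀ i, i < storage.length →
      m ≤ (storage.getD i "").toList.length := by
    intro i hi
    exact hrows _ (mem_getD "" hi)
  refine ⟨⟨by simp, ?_, ?_⟩, ⟨by simp, ?_⟩, ?_⟩
  · intro i hi
    rw [getD_map_row (fun s => s.toList) storage hi [] ""]
    exact hrow i hi
  · cases storage with
    | nil => exact absurd rfl hne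
    | cons s t => rfl
  · intro i hi
    rw [getD_map_row (fun s => s.toList.take m) storage hi [] ""]
    rw [List.length_take]
    exact Nat.min_eq_left (hrow i hi)
  · intro i j hi hj
    unfold ggetA
    rw [getD_map_row (fun s => s.toList) storage hi [] "",
      getD_map_row (fun s => s.toList.take m) storage hi [] "",
      getD_take _ m j hj]

-- ===== VERDICT (by name: the statement is the Claim_ definition above) =====
theorem solution_spec : Claim_equal_solution := by
  intro storage requests _ hpre
  obtain ⟨hne, hrows, -⟩ := hpre
  unfold Spec_solution
  simp only [solution, solution_alt]
  obtain ⟨hA0, hB0, hW0⟩ := init_rel storage hne hrows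
  obtain ⟨hAf, hBf, hWf⟩ := requests_fold_rel requests _ _ hA0 hB0 hW0
  exact count_eq hAf hBf hWf
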